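-- pv_equiv track=rewrite | github.com/opacut/advent_of_code | 2015/3/solution.py | move_santa
-- ===== SOURCE A (Python) =====
-- def move_santa(move_data):
--     santa = True
--     visited = dict()
--     visited[(0,0)] = 1
--     current_position_santa = (0,0)
--     current_position_robot = (0,0)
--     for char in move_data:
--         if santa:
--             if char == "^":
--                 current_position_santa = (current_position_santa[0]+1, current_position_santa[1])
--             elif char == "v":
--                 current_position_santa = (current_position_santa[0]-1, current_position_santa[1])
--             elif char == "<":
--                 current_position_santa = (current_position_santa[0], current_position_santa[1]-1)
--             elif char == ">":
--                 current_position_santa = (current_position_santa[0], current_position_santa[1]+1)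
--         if not santa:
--             if char == "^":
--                 current_position_robot = (current_position_robot[0]+1, current_position_robot[1])
--             elif char == "v":
--                 current_position_robot = (current_position_robot[0]-1, current_position_robot[1])
--             elif char == "<":
--                 current_position_robot = (current_position_robot[0], current_position_robot[1]-1)
--             elif char == ">":
--                 current_position_robot = (current_position_robot[0], current_position_robot[1]+1)
--         already_visited = False
--         for pos in list(visited.keys()):
--             if santa:
--                 if (current_position_santa[0] == pos[0] and current_position_santa[1] == pos[1]):
--                     already_visited = True
--                     visited[pos] += 1
--             else:
--                 if (current_position_robot[0] == pos[0] and current_position_robot[1] == pos[1]):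
--                     already_visited = True
--                     visited[pos] += 1
--         if not already_visited:
--             if santa:
--                 visited[current_position_santa] = 1
--             else:
--                 visited[current_position_robot] = 1
--         santa = not santa
--     return visited
-- ===== SOURCE B (Python) =====
-- def _delta(c):
--     if c == "^":
--         return (1, 0)
--     if c == "v":
--         return (-1, 0)
--     if c == "<":
--         return (0, -1)
--     if c == ">":
--         return (0, 1)
--     return (0, 0)
--
--
-- def _every_other(s):
--     keep, out = True, []
--     for c in s:
--         if keep:
--             out.append(c)
--         keep = not keep
--     return out
--
--
-- def _walk(moves):
--     x, y, path = 0, 0, []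
--     for c in moves:
--         dx, dy = _delta(c)
--         x, y = x + dx, y + dy
--         path.append((x, y))
--     return path
--
--
-- def move_santa(move_data):
--     santa_path = _walk(_every_other(move_data))
--     robot_path = _walk(_every_other(move_data[1:]))
--     seq = [(0, 0)]
--     for s, r in zip(santa_path, robot_path):
--         seq += [s, r]
--     seq += santa_path[len(robot_path):]
--     counts = {}
--     for p in seq:
--         counts[p] = counts.get(p, 0) + 1
--     return counts
-- ===== Notes on version B (the rewrite author's own statement) =====
-- stated objective: alternative
-- what changed: B splits the moves into santa's and the robot's alternating subsequences, computes the two paths as plain position lists, interleaves them after a single (0,0) start, and tallies counts with one get-default dict pass, replacing A's single interleaved loop that rescans the whole visited-keys list after every move.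
import Mathlib
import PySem

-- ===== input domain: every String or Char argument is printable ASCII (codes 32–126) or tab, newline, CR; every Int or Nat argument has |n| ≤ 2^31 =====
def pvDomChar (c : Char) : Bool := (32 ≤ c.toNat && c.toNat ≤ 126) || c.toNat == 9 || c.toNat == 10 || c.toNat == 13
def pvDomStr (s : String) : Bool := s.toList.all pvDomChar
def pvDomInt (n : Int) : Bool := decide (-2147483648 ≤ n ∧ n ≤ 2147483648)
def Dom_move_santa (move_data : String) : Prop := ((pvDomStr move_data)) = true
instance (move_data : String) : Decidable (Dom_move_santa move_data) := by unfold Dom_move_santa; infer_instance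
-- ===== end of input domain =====

-- B splits the moves into santa's and the robot's subsequences, computes each path separately,
-- interleaves them back and tallies the counts in one dict pass, instead of A's single
-- interleaved loop that rescans the visited keys after every move (objective: alternative).

-- ===== PORT A =====
-- loop body of A's 'for char in move_data' loop; state = (santa, visited, current_position_santa, current_position_robot)
def pvAStep (st : Bool × PySem.Dict (Int × Int) Int × (Int × Int) × (Int × Int)) (char : Char) :
    Bool × PySem.Dict (Int × Int) Int × (Int × Int) × (Int × Int) :=
  let santa := st.1
  let visited := st.2.1
  let cps := st.2.2.1
  let cpr := st.2.2.2
  let cps := if santa then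
      (if char == '^' then (cps.1 + 1, cps.2)
       else if char == 'v' then (cps.1 - 1, cps.2)
       else if char == '<' then (cps.1, cps.2 - 1)
       else if char == '>' then (cps.1, cps.2 + 1)
       else cps)
    else cps
  let cpr := if !santa then
      (if char == '^' then (cpr.1 + 1, cpr.2)
       else if char == 'v' then (cpr.1 - 1, cpr.2)
       else if char == '<' then (cpr.1, cpr.2 - 1)
       else if char == '>' then (cpr.1, cpr.2 + 1)
       else cpr)
    else cpr
  -- 'for pos in list(visited.keys()): …' with already_visited accumulated
  let scan := visited.keys.foldl (fun (acc : Bool × PySem.Dict (Int × Int) Int) pos =>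
      if santa then
        (if cps.1 == pos.1 && cps.2 == pos.2 then (true, acc.2.modify pos 0 (· + 1)) else acc)
      else
        (if cpr.1 == pos.1 && cpr.2 == pos.2 then (true, acc.2.modify pos 0 (· + 1)) else acc))
    (false, visited)
  let visited := if !scan.1 then (if santa then scan.2.insert cps 1 else scan.2.insert cpr 1) else scan.2
  (!santa, visited, cps, cpr)

def move_santa (move_data : String) : List (Int × Int × Int) :=
  let final := move_data.toList.foldl pvAStep
    (true, PySem.Dict.empty.insert ((0 : Int), (0 : Int)) (1 : Int), ((0 : Int), (0 : Int)), ((0 : Int), (0 : Int)))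
  (final.2.1.items).map (fun kv => (kv.1.1, kv.1.2, kv.2))

-- ===== PORT B =====
def pvDelta (c : Char) : Int × Int :=
  if c == '^' then (1, 0)
  else if c == 'v' then (-1, 0)
  else if c == '<' then (0, -1)
  else if c == '>' then (0, 1)
  else (0, 0)

-- _every_other: keep, out = True, []; for c in s: if keep: out.append(c); keep = not keep
def pvEveryOther (s : List Char) : List Char :=
  (s.foldl (fun (st : Bool × List Char) c =>
      (!st.1, if st.1 then st.2 ++ [c] else st.2)) (true, [])).2

-- _walk: x, y, path = 0, 0, []; for c in moves: dx, dy = _delta(c); x, y = x+dx, y+dy; path.append((x, y))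
def pvWalk (moves : List Char) : List (Int × Int) :=
  (moves.foldl (fun (st : Int × Int × List (Int × Int)) c =>
      let d := pvDelta c
      let x := st.1 + d.1
      let y := st.2.1 + d.2
      (x, y, st.2.2 ++ [(x, y)])) ((0 : Int), (0 : Int), [])).2.2

def move_santa_alt (move_data : String) : List (Int × Int × Int) :=
  let santa_path := pvWalk (pvEveryOther move_data.toList)
  let robot_path := pvWalk (pvEveryOther (PySem.List.slice move_data.toList (some 1) none))
  let seq := (santa_path.zip robot_path).foldl (fun acc p => acc ++ [p.1, p.2]) [((0 : Int), (0 : Int))]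
  let seq := seq ++ PySem.List.slice santa_path (some (robot_path.length : Int)) none
  let counts := seq.foldl (fun (d : PySem.Dict (Int × Int) Int) p => d.insert p (d.getD p 0 + 1)) PySem.Dict.empty
  counts.items.map (fun kv => (kv.1.1, kv.1.2, kv.2))

-- ===== PRECONDITION & SPEC =====
def Spec_move_santa (move_data : String) (out : List (Int × Int × Int)) : Prop := out = move_santa_alt move_data
instance (move_data : String) (out : List (Int × Int × Int)) : Decidable (Spec_move_santa move_data out) := by unfold Spec_move_santa; infer_instance

-- ===== CLAIM (what is proved, stated in full; the proofs are below) =====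
def Claim_equal_move_santa : Prop := ∀ (move_data : String), Dom_move_santa move_data → Spec_move_santa move_data (move_santa move_data)

-- ===== LEMMAS AND PROOFS =====

def pvEvens : List Char → List Char
  | [] => []
  | [c] => [c]
  | c :: _ :: cs => c :: pvEvens cs

def pvOdds : List Char → List Char
  | [] => []
  | _ :: cs => pvEvens cs

lemma pvEvens_cons (c : Char) (l : List Char) : pvEvens (c :: l) = c :: pvOdds l := by
  cases l <;> rfl

lemma pvEveryOther_go (l : List Char) : ∀ (b : Bool) (acc : List Char),
    (l.foldl (fun (st : Bool × List Char) c =>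
      (!st.1, if st.1 then st.2 ++ [c] else st.2)) (b, acc)).2
    = acc ++ (if b then pvEvens l else pvOdds l) := by
  induction l with
  | nil => intro b acc; cases b <;> simp [pvEvens, pvOdds]
  | cons c l ih =>
    intro b acc
    cases b with
    | true => simp [List.foldl_cons, ih, pvEvens_cons]
    | false => simp [List.foldl_cons, ih, pvOdds]

lemma pvEveryOther_eq (s : List Char) : pvEveryOther s = pvEvens s := by
  simp [pvEveryOther, pvEveryOther_go]

lemma pvOdds_eq_tail (s : List Char) : pvOdds s = pvEvens s.tail := by
  cases s <;> rfl

def pvStep (p : Int × Int) (c : Char) : Int × Int := (p.1 + (pvDelta c).1, p.2 + (pvDelta c).2)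

def pvPath (p : Int × Int) : List Char → List (Int × Int)
  | [] => []
  | c :: cs => pvStep p c :: pvPath (pvStep p c) cs

def pvEnd (p : Int × Int) : List Char → Int × Int
  | [] => p
  | c :: cs => pvEnd (pvStep p c) cs

lemma pvWalk_go (cs : List Char) : ∀ (x y : Int) (acc : List (Int × Int)),
    (cs.foldl (fun (st : Int × Int × List (Int × Int)) c =>
      let d := pvDelta c
      let x := st.1 + d.1
      let y := st.2.1 + d.2
      (x, y, st.2.2 ++ [(x, y)])) (x, y, acc))
    = ((pvEnd (x, y) cs).1, (pvEnd (x, y) cs).2, acc ++ pvPath (x, y) cs) := by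
  induction cs with
  | nil => intro x y acc; simp [pvEnd, pvPath]
  | cons c cs ih =>
    intro x y acc
    simp only [List.foldl_cons, ih, pvEnd, pvPath, pvStep]
    simp

lemma pvWalk_eq (cs : List Char) : pvWalk cs = pvPath (0, 0) cs := by
  simp [pvWalk, pvWalk_go]

def pvInterleave (a b : List (Int × Int)) : List (Int × Int) :=
  (a.zip b).flatMap (fun p => [p.1, p.2]) ++ a.drop b.length

lemma pvInterleave_cons_cons (x y : Int × Int) (a b : List (Int × Int)) :
    pvInterleave (x :: a) (y :: b) = x :: y :: pvInterleave a b := by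
  simp [pvInterleave]

def pvAltPos : Bool → (Int × Int) → (Int × Int) → List Char → List (Int × Int)
  | _, _, _, [] => []
  | true, s, r, c :: cs => pvStep s c :: pvAltPos false (pvStep s c) r cs
  | false, s, r, c :: cs => pvStep r c :: pvAltPos true s (pvStep r c) cs

theorem pvAltPos_eq : ∀ (cs : List Char) (s r : Int × Int),
    pvAltPos true s r cs = pvInterleave (pvPath s (pvEvens cs)) (pvPath r (pvOdds cs))
  | [], s, r => by simp [pvAltPos, pvEvens, pvOdds, pvPath, pvInterleave]
  | [c], s, r => by simp [pvAltPos, pvEvens, pvOdds, pvPath, pvInterleave]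
  | c :: d :: cs, s, r => by
    have ih := pvAltPos_eq cs (pvStep s c) (pvStep r d)
    simp only [pvAltPos, pvEvens, pvOdds, pvPath, pvEvens_cons, pvInterleave_cons_cons, ih]

-- the dict-scan of A: no key matches → state unchanged
lemma pvScan_no_match (p : Int × Int) (ks : List (Int × Int)) (h : p ∉ ks) :
    ∀ (st : Bool × PySem.Dict (Int × Int) Int),
    ks.foldl (fun acc pos =>
      if p.1 == pos.1 && p.2 == pos.2 then (true, acc.2.modify pos 0 (· + 1)) else acc) st = st := by
  induction ks with
  | nil => intro st; rfl
  | cons k ks ih =>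
    intro st
    have hk : ¬(p.1 == k.1 && p.2 == k.2) = true := by
      simp only [List.mem_cons, not_or] at h
      simp only [Bool.and_eq_true, beq_iff_eq]
      rintro ⟨h1, h2⟩
      exact h.1 (Prod.ext h1 h2)
    simp only [List.foldl_cons, if_neg hk, ih (List.not_mem_of_not_mem_cons h)]

lemma pvScan_go (p : Int × Int) (ks : List (Int × Int)) (hnd : ks.Nodup) :
    ∀ (b : Bool) (d : PySem.Dict (Int × Int) Int),
    ks.foldl (fun acc pos =>
      if p.1 == pos.1 && p.2 == pos.2 then (true, acc.2.modify pos 0 (· + 1)) else acc) (b, d)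
    = (b || decide (p ∈ ks), if p ∈ ks then d.modify p 0 (· + 1) else d) := by
  induction ks with
  | nil => intro b d; simp
  | cons k ks ih =>
    intro b d
    by_cases hpk : p = k
    · subst hpk
      have hnot : p ∉ ks := (List.nodup_cons.mp hnd).1
      simp only [List.foldl_cons, beq_self_eq_true, Bool.and_self,
        pvScan_no_match p ks hnot]
      simp [hnot]
    · have hk : ¬(p.1 == k.1 && p.2 == k.2) = true := by
        simp only [Bool.and_eq_true, beq_iff_eq]
        rintro ⟨h1, h2⟩
        exact hpk (Prod.ext h1 h2)
      simp only [List.foldl_cons, if_neg hk, ih (List.nodup_cons.mp hnd).2 b d]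
      simp [hpk]

lemma pvDict_insert_eq_modify (d : PySem.Dict (Int × Int) Int) (p : Int × Int)
    (h : p ∉ d.keys) : d.insert p 1 = d.modify p 0 (· + 1) := by
  have hc : d.contains p = false := by
    rw [← Bool.not_eq_true, PySem.Dict.contains_iff_mem_keys]; exact h
  apply PySem.Dict.ext
  simp [PySem.Dict.items_insert, PySem.Dict.modify, hc]
  rw [PySem.Dict.getD_of_not_contains (d := d) (k := p) (d0 := 0) hc]

lemma pvNodup_keys_modify (d : PySem.Dict (Int × Int) Int) (p : Int × Int)
    (h : d.keys.Nodup) : (d.modify p 0 (· + 1)).keys.Nodup := by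
  have := PySem.Dict.nodup_keys_foldl_modify_key (l := [p]) (key := id) (d0 := (0 : Int))
    (f := fun _ _ => (· + 1)) (d := d) h
  simpa using this

-- one A-iteration on the dict is a counter bump of the mover's new position
lemma pvAStep_dict (santa : Bool) (d : PySem.Dict (Int × Int) Int) (s r : Int × Int) (c : Char)
    (h : d.keys.Nodup) :
    pvAStep (santa, d, s, r) c
    = (!santa, (if santa then d.modify (pvStep s c) 0 (· + 1) else d.modify (pvStep r c) 0 (· + 1)),
       (if santa then pvStep s c else s), (if santa then r else pvStep r c)) := by
  have hpos : ∀ p : Int × Int,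
      (if c == '^' then (p.1 + 1, p.2)
       else if c == 'v' then (p.1 - 1, p.2)
       else if c == '<' then (p.1, p.2 - 1)
       else if c == '>' then (p.1, p.2 + 1)
       else p) = pvStep p c := by
    intro p
    simp only [pvStep, pvDelta]
    split_ifs <;> simp <;> try omega
  have key : ∀ p : Int × Int,
      (let scan := d.keys.foldl (fun (acc : Bool × PySem.Dict (Int × Int) Int) pos =>
          (if p.1 == pos.1 && p.2 == pos.2 then (true, acc.2.modify pos 0 (· + 1)) else acc))
        (false, d)
       if !scan.1 then scan.2.insert p 1 else scan.2) = d.modify p 0 (· + 1) := by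
    intro p
    rw [pvScan_go p d.keys h false d]
    by_cases hp : p ∈ d.keys
    · simp [hp]
    · simp only [hp, decide_false, Bool.false_or, Bool.not_false, if_pos]
      exact pvDict_insert_eq_modify d p hp
  cases santa with
  | true =>
    simp only [pvAStep, Bool.not_true, hpos, if_pos]
    simpa using key (pvStep s c)
  | false =>
    simp only [pvAStep, Bool.not_false, hpos]
    simpa using key (pvStep r c)

lemma pvALoop (cs : List Char) : ∀ (santa : Bool) (d : PySem.Dict (Int × Int) Int) (s r : Int × Int),
    d.keys.Nodup →
    (cs.foldl pvAStep (santa, d, s, r)).2.1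
    = (pvAltPos santa s r cs).foldl (fun d p => d.modify p 0 (· + 1)) d := by
  induction cs with
  | nil => intro santa d s r _; rfl
  | cons c cs ih =>
    intro santa d s r h
    rw [List.foldl_cons, pvAStep_dict santa d s r c h]
    cases santa with
    | true =>
      simp only [Bool.not_true, reduceIte]
      rw [ih false _ (pvStep s c) r (pvNodup_keys_modify d (pvStep s c) h)]
      rfl
    | false =>
      simp only [Bool.not_false, Bool.false_eq_true, reduceIte]
      rw [ih true _ s (pvStep r c) (pvNodup_keys_modify d (pvStep r c) h)]
      rfl

lemma pvInit_dict :
    (PySem.Dict.empty.insert ((0 : Int), (0 : Int)) (1 : Int))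
    = PySem.Dict.empty.modify ((0 : Int), (0 : Int)) 0 (· + 1) := by decide

lemma pvA_counter (l : List Char) :
    (l.foldl pvAStep
      (true, PySem.Dict.empty.insert ((0 : Int), (0 : Int)) (1 : Int), ((0 : Int), (0 : Int)), ((0 : Int), (0 : Int)))).2.1
    = PySem.Dict.counter (((0 : Int), (0 : Int)) :: pvAltPos true (0, 0) (0, 0) l) := by
  rw [pvALoop l true _ (0, 0) (0, 0) (by decide), pvInit_dict,
    PySem.Dict.counter_eq_foldl, List.foldl_cons]

lemma pvB_seq (l : List Char) :
    ((pvWalk (pvEveryOther l)).zip (pvWalk (pvEveryOther (PySem.List.slice l (some 1) none)))).foldl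
        (fun acc p => acc ++ [p.1, p.2]) [((0 : Int), (0 : Int))]
      ++ PySem.List.slice (pvWalk (pvEveryOther l))
          (some (((pvWalk (pvEveryOther (PySem.List.slice l (some 1) none))).length : Int))) none
    = ((0 : Int), (0 : Int)) :: pvAltPos true (0, 0) (0, 0) l := by
  simp only [PySem.List.slice_from_one, pvEveryOther_eq, pvWalk_eq, ← pvOdds_eq_tail,
    PySem.List.foldl_append_eq_flatMap, PySem.List.slice_from_natCast, pvAltPos_eq]
  simp [pvInterleave]

-- ===== VERDICT (by name: the statement is the Claim_ definition above) =====
theorem move_santa_spec : Claim_equal_move_santa := by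
  intro move_data _
  unfold Spec_move_santa
  simp only [move_santa, move_santa_alt]
  rw [pvA_counter move_data.toList, pvB_seq move_data.toList,
    PySem.Dict.foldl_insert_getD_add_one_eq_counter]
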